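-- pv_equiv track=rewrite | github.com/KubakCz/AoC2020 | 07/handy_haversacks.py | get_outer_bags
-- ===== SOURCE A (Python) =====
-- from typing import Dict, Tuple, Set
--
-- def get_outer_bags(bag: str, can_be_in_dict: Dict[str, Set[str]]) -> Set[str]:
--     # dfs
--     result: Set[str] = set()
--     stack = [bag]
--
--     while len(stack) > 0:
--         current = stack.pop()
--         for b in can_be_in_dict.get(current, set()):
--             if b not in result:
--                 result.add(b)
--                 stack.append(b)
--
--     return result
-- ===== SOURCE B (Python) =====
-- def get_outer_bags(bag, can_be_in_dict):
--     # recursive DFS on the call stack instead of an explicit worklist: each call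
--     # collects the still-unseen neighbours in one comprehension, marks them all
--     # at once, then recurses into them most-recently-listed first (pop from end).
--     result = set()
--
--     def visit(current):
--         fresh = [b for b in can_be_in_dict.get(current, set()) if b not in result]
--         result.update(fresh)
--         while fresh:
--             visit(fresh.pop())
--
--     visit(bag)
--     return result
-- ===== Notes on version B (the rewrite author's own statement) =====
-- stated objective: alternative
-- what changed: The explicit while-loop worklist stack is replaced by a recursive depth-first visitor on the call stack: visit() gathers the unseen neighbours of the current bag in one comprehension, marks them as a batch via set.update, and then recurses into each of them in LIFO order.
import Mathlib
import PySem

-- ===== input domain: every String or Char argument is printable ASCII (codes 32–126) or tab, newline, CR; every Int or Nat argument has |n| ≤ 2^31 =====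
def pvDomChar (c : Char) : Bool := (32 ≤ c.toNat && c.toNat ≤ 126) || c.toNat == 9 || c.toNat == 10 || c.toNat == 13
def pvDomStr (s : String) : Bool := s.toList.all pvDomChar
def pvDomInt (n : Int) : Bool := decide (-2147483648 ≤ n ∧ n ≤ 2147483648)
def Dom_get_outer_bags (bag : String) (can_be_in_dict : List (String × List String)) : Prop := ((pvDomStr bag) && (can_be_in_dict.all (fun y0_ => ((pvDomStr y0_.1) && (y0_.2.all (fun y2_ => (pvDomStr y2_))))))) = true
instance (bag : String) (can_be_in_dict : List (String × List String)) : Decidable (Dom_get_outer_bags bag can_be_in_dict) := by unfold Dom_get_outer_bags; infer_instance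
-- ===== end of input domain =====

-- B replaces A's explicit worklist stack with a recursive depth-first visitor (one filter
-- pass collects the unseen neighbours, set.update marks them, then recursion in LIFO order);
-- same reachability set, same cost — objective: alternative decomposition.

-- ===== PORT A =====
-- fuel for the while-loop: 1 + total size of all value lists, ≥ the number of loop
-- iterations (proved sufficient below, so the guard never fires).
def pvSumLens (d : List (String × List String)) : Nat :=
  d.foldl (fun n p => n + p.2.length) 0

-- A's inner 'for b in …' loop: walk the neighbour set once, adding each unseen bag to
-- result and pushing it on the stack.
def pvScanA : List String → PySem.Set String → List String → PySem.Set String × List String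
  | [], result, stack => (result, stack)
  | b :: bs, result, stack =>
      if PySem.Set.contains result b
      then pvScanA bs result stack
      else pvScanA bs (PySem.Set.add result b) (b :: stack)

-- A's while-loop; the stack is top-first (stack.pop() = head, stack.append = cons).
def pvGoA (d : List (String × List String)) : Nat → List String → PySem.Set String → List String
  | 0, _, result => result
  | _ + 1, [], result => result
  | fuel + 1, current :: rest, result =>
      let st := pvScanA (PySem.Set.ofList ((PySem.Dict.mk d).getD current [])) result rest
      pvGoA d fuel st.2 st.1

def get_outer_bags (bag : String) (can_be_in_dict : List (String × List String)) : List String :=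
  pvGoA can_be_in_dict (1 + pvSumLens can_be_in_dict) [bag] PySem.Set.empty

-- ===== PORT B =====
-- visit(current): the comprehension is one filter pass collecting the unseen neighbours
-- ('fresh'), result.update(fresh) marks them as a batch, and the while/pop loop recurses
-- over fresh from the back; the fuel bounds the recursion depth (proved sufficient below).
def pvVisit (d : List (String × List String)) : Nat → String → PySem.Set String → PySem.Set String
  | 0, _, result => result
  | depth + 1, current, result =>
      let fresh := (PySem.Set.ofList ((PySem.Dict.mk d).getD current [])).filter
        (fun b => !(PySem.Set.contains result b))
      let marked := PySem.Set.update result fresh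
      fresh.reverse.foldl (fun r b => pvVisit d depth b r) marked

def get_outer_bags_alt (bag : String) (can_be_in_dict : List (String × List String)) : List String :=
  pvVisit can_be_in_dict (1 + pvSumLens can_be_in_dict) bag PySem.Set.empty

-- ===== PRECONDITION & SPEC =====
def Spec_get_outer_bags (bag : String) (can_be_in_dict : List (String × List String)) (out : List String) : Prop := out = get_outer_bags_alt bag can_be_in_dict
instance (bag : String) (can_be_in_dict : List (String × List String)) (out : List String) : Decidable (Spec_get_outer_bags bag can_be_in_dict out) := by unfold Spec_get_outer_bags; infer_instance

-- ===== CLAIM (what is proved, stated in full; the proofs are below) =====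
def Claim_equal_get_outer_bags : Prop := ∀ (bag : String) (can_be_in_dict : List (String × List String)), Dom_get_outer_bags bag can_be_in_dict → Spec_get_outer_bags bag can_be_in_dict (get_outer_bags bag can_be_in_dict)

-- ===== LEMMAS AND PROOFS =====

-- all strings occurring in the dict's value lists
def pvV (d : List (String × List String)) : List String := d.flatMap Prod.snd

-- how many value-pool strings are still missing from result (the termination potential)
def pvRV (d : List (String × List String)) (r : List String) : Nat :=
  ((pvV d).toFinset \ r.toFinset).card

-- the sublist of ns that is new w.r.t. r (in order): what both batch steps add
def pvNews : List String → List String → List String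
  | [], _ => []
  | b :: bs, r => if b ∈ r then pvNews bs r else b :: pvNews bs (r ++ [b])

lemma pvNews_congr : ∀ (ns r r' : List String), (∀ x, x ∈ r ↔ x ∈ r') →
    pvNews ns r = pvNews ns r' := by
  intro ns
  induction ns with
  | nil => intro r r' _; rfl
  | cons b bs ih =>
      intro r r' h
      by_cases hb : b ∈ r
      · simp [pvNews, hb, (h b).mp hb, ih r r' h]
      · have hb' : b ∉ r' := fun c => hb ((h b).mpr c)
        simp only [pvNews, hb, hb', ite_false]
        rw [ih (r ++ [b]) (r' ++ [b]) (by intro x; simp [h x])]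

lemma pvNews_append_irrel : ∀ (ns r : List String) (a : String), a ∉ ns →
    pvNews ns (r ++ [a]) = pvNews ns r := by
  intro ns
  induction ns with
  | nil => intro r a _; rfl
  | cons b bs ih =>
      intro r a ha
      have hba : b ≠ a := fun h => ha (by simp [h])
      have habs : a ∉ bs := fun h => ha (by simp [h])
      by_cases hb : b ∈ r
      · have : b ∈ r ++ [a] := by simp [hb]
        simp only [pvNews, hb, this, ite_true]
        exact ih r a habs
      · have : b ∉ r ++ [a] := by simp [hb, hba]
        simp only [pvNews, hb, this, ite_false]
        rw [pvNews_congr bs ((r ++ [a]) ++ [b]) ((r ++ [b]) ++ [a]) (by intro x; simp; tauto)]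
        rw [ih (r ++ [b]) a habs]

lemma pvNews_eq_filter : ∀ (ns r : List String), ns.Nodup →
    pvNews ns r = ns.filter (fun b => !(PySem.Set.contains r b)) := by
  intro ns
  induction ns with
  | nil => intro r _; rfl
  | cons b bs ih =>
      intro r h
      rw [List.nodup_cons] at h
      by_cases hb : b ∈ r
      · simp [pvNews, PySem.Set.contains, hb, ih r h.2]
      · simp only [pvNews, hb, ite_false, List.filter_cons]
        rw [pvNews_append_irrel bs r b h.1, ih r h.2]
        simp [PySem.Set.contains, hb]

lemma pvNews_mem : ∀ (ns r : List String) (b : String), b ∈ pvNews ns r → b ∈ ns ∧ b ∉ r := by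
  intro ns
  induction ns with
  | nil => intro r b h; simp [pvNews] at h
  | cons a as ih =>
      intro r b h
      by_cases ha : a ∈ r
      · simp [pvNews, ha] at h
        obtain ⟨h1, h2⟩ := ih r b h
        exact ⟨by simp [h1], h2⟩
      · simp [pvNews, ha] at h
        rcases h with h | h
        · subst h; exact ⟨by simp, ha⟩
        · obtain ⟨h1, h2⟩ := ih (r ++ [a]) b h
          simp at h2
          exact ⟨by simp [h1], h2.1⟩

lemma pvNews_nodup : ∀ (ns r : List String), (pvNews ns r).Nodup := by
  intro ns
  induction ns with
  | nil => intro r; simp [pvNews]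
  | cons a as ih =>
      intro r
      by_cases ha : a ∈ r
      · simpa [pvNews, ha] using ih r
      · simp only [pvNews, ha, ite_false]
        refine List.nodup_cons.mpr ⟨?_, ih _⟩
        intro hmem
        have := (pvNews_mem _ _ _ hmem).2
        simp at this

lemma scanA_eq (ns : List String) : ∀ (r s : List String),
    pvScanA ns r s = (r ++ pvNews ns r, (pvNews ns r).reverse ++ s) := by
  induction ns with
  | nil => intro r s; simp [pvScanA, pvNews]
  | cons b bs ih =>
      intro r s
      by_cases hb : b ∈ r <;>
        simp [pvScanA, pvNews, PySem.Set.contains, PySem.Set.add, hb, ih]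

lemma update_news : ∀ (news r : List String), (∀ b ∈ news, b ∉ r) → news.Nodup →
    PySem.Set.update r news = r ++ news := by
  intro news
  induction news with
  | nil => intro r _ _; simp [PySem.Set.update]
  | cons b bs ih =>
      intro r h hnd
      rw [List.nodup_cons] at hnd
      have hb : b ∉ r := h b (by simp)
      have hadd : PySem.Set.add r b = r ++ [b] := by
        simp [PySem.Set.add, PySem.Set.contains, hb]
      have hrest : PySem.Set.update (r ++ [b]) bs = (r ++ [b]) ++ bs := by
        refine ih (r ++ [b]) ?_ hnd.2
        intro x hx
        simp only [List.mem_append, List.mem_singleton]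
        rintro (hxr | rfl)
        · exact h x (by simp [hx]) hxr
        · exact hnd.1 hx
      calc PySem.Set.update r (b :: bs)
          = PySem.Set.update (r ++ [b]) bs := by
            simp [PySem.Set.update, List.foldl_cons, hadd]
        _ = r ++ b :: bs := by rw [hrest]; simp

-- one unfolding of visit in terms of pvNews
lemma visit_succ (d : List (String × List String)) (S : Nat) (c : String) (r : List String) :
    pvVisit d (S + 1) c r
      = (pvNews (PySem.Set.ofList ((PySem.Dict.mk d).getD c [])) r).reverse.foldl
          (fun r b => pvVisit d S b r)
          (r ++ pvNews (PySem.Set.ofList ((PySem.Dict.mk d).getD c [])) r) := by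
  have hf := pvNews_eq_filter (PySem.Set.ofList ((PySem.Dict.mk d).getD c [])) r
      (PySem.Set.nodup_ofList _)
  have hu := update_news (pvNews (PySem.Set.ofList ((PySem.Dict.mk d).getD c [])) r) r
      (fun b hb => (pvNews_mem _ _ _ hb).2) (pvNews_nodup _ _)
  simp only [pvVisit, ← hf, hu]

lemma rv_step (d : List (String × List String)) (ns r : List String)
    (h : ∀ b ∈ ns, b ∈ pvV d) :
    pvRV d (r ++ pvNews ns r) + (pvNews ns r).length = pvRV d r := by
  classical
  set news := pvNews ns r with hnews
  have hsub : news.toFinset ⊆ (pvV d).toFinset \ r.toFinset := by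
    intro x hx
    simp only [List.mem_toFinset] at hx
    obtain ⟨h1, h2⟩ := pvNews_mem ns r x hx
    simp [Finset.mem_sdiff, List.mem_toFinset, h x h1, h2]
  have hcard : news.toFinset.card = news.length := List.toFinset_card_of_nodup (pvNews_nodup ns r)
  have : pvRV d (r ++ news) = ((pvV d).toFinset \ r.toFinset).card - news.toFinset.card := by
    unfold pvRV
    have hsd : (pvV d).toFinset \ (r ++ news).toFinset
        = ((pvV d).toFinset \ r.toFinset) \ news.toFinset := by
      rw [List.toFinset_append, sdiff_sdiff, Finset.sup_eq_union]
    rw [hsd, Finset.card_sdiff, Finset.inter_eq_left.mpr hsub]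
  have hle : news.toFinset.card ≤ ((pvV d).toFinset \ r.toFinset).card :=
    Finset.card_le_card hsub
  unfold pvRV at *
  omega

lemma rv_mono (d : List (String × List String)) {r r' : List String}
    (h : ∀ x ∈ r, x ∈ r') : pvRV d r' ≤ pvRV d r := by
  apply Finset.card_le_card
  intro x hx
  simp only [Finset.mem_sdiff, List.mem_toFinset] at hx ⊢
  exact ⟨hx.1, fun hxr => hx.2 (h x hxr)⟩

lemma pvSumLens_eq (d : List (String × List String)) : pvSumLens d = (pvV d).length := by
  unfold pvSumLens pvV
  suffices h : ∀ (l : List (String × List String)) (n : Nat),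
      l.foldl (fun n p => n + p.2.length) n = n + (l.flatMap Prod.snd).length by
    simpa using h d 0
  intro l
  induction l with
  | nil => intro n; simp
  | cons p ps ih => intro n; simp [List.foldl_cons, ih, List.flatMap_cons]; omega

lemma rv_le (d : List (String × List String)) (r : List String) : pvRV d r ≤ pvSumLens d := by
  rw [pvSumLens_eq]
  calc pvRV d r ≤ (pvV d).toFinset.card := Finset.card_le_card (Finset.sdiff_subset)
    _ ≤ (pvV d).length := (pvV d).toFinset_card_le

lemma getD_sub (d : List (String × List String)) (c : String) :
    ∀ b ∈ PySem.Set.ofList ((PySem.Dict.mk d).getD c []), b ∈ pvV d := by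
  intro b hb
  rw [PySem.Set.mem_ofList] at hb
  induction d with
  | nil =>
      simp [PySem.Dict.getD_eq_get?_getD, PySem.Dict.get?] at hb
  | cons p ps ih =>
      rw [PySem.Dict.getD_eq_get?_getD] at hb
      rw [PySem.Dict.get?_mk_cons] at hb
      by_cases hc : p.1 == c
      · simp [hc] at hb
        exact by simp [pvV, List.flatMap_cons, hb]
      · simp [hc] at hb
        have := ih (by rw [PySem.Dict.getD_eq_get?_getD]; simpa using hb)
        simp [pvV, List.flatMap_cons]
        right
        simpa [pvV] using this

lemma visit_sub (d : List (String × List String)) :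
    ∀ (f : Nat) (c : String) (r : List String) (x : String), x ∈ r → x ∈ pvVisit d f c r := by
  intro f
  induction f with
  | zero => intro c r x hx; simpa [pvVisit] using hx
  | succ f ih =>
      intro c r x hx
      rw [visit_succ]
      have : ∀ (l r₂ : List String), x ∈ r₂ →
          x ∈ l.foldl (fun r b => pvVisit d f b r) r₂ := by
        intro l
        induction l with
        | nil => intro r₂ h; simpa using h
        | cons a as ihl => intro r₂ h; exact ihl _ (ih a r₂ x h)
      exact this _ _ (by simp [hx])

lemma visit_fuel (d : List (String × List String)) :
    ∀ (k f g : Nat) (c : String) (r : List String),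
      pvRV d r < f → pvRV d r < g → pvRV d r ≤ k →
      pvVisit d f c r = pvVisit d g c r := by
  intro k
  induction k with
  | zero =>
      intro f g c r hf hg hk
      obtain ⟨f', rfl⟩ : ∃ f', f = f' + 1 := ⟨f - 1, by omega⟩
      obtain ⟨g', rfl⟩ : ∃ g', g = g' + 1 := ⟨g - 1, by omega⟩
      rw [visit_succ, visit_succ]
      have hstep := rv_step d (PySem.Set.ofList ((PySem.Dict.mk d).getD c [])) r (getD_sub d c)
      have hlen : (pvNews (PySem.Set.ofList ((PySem.Dict.mk d).getD c [])) r).length = 0 := by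
        omega
      rw [List.length_eq_zero_iff] at hlen
      simp [hlen]
  | succ k ih =>
      intro f g c r hf hg hk
      obtain ⟨f', rfl⟩ : ∃ f', f = f' + 1 := ⟨f - 1, by omega⟩
      obtain ⟨g', rfl⟩ : ∃ g', g = g' + 1 := ⟨g - 1, by omega⟩
      rw [visit_succ, visit_succ]
      set ns := PySem.Set.ofList ((PySem.Dict.mk d).getD c []) with hns
      set news := pvNews ns r with hnews
      by_cases hnil : news = []
      · simp [hnil]
      · have hstep := rv_step d ns r (getD_sub d c)
        rw [← hnews] at hstep
        have hpos : 0 < news.length := List.length_pos_of_ne_nil hnil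
        have hr' : pvRV d (r ++ news) ≤ k := by omega
        have hrf' : pvRV d (r ++ news) < f' := by omega
        have hrg' : pvRV d (r ++ news) < g' := by omega
        have main : ∀ (l : List String) (r₂ : List String),
            pvRV d r₂ < f' → pvRV d r₂ < g' → pvRV d r₂ ≤ k →
            l.foldl (fun r b => pvVisit d f' b r) r₂
              = l.foldl (fun r b => pvVisit d g' b r) r₂ := by
          intro l
          induction l with
          | nil => intro r₂ _ _ _; rfl
          | cons a as ihl =>
              intro r₂ h1 h2 h3
              have hhead := ih f' g' a r₂ h1 h2 h3
              simp only [List.foldl_cons, hhead]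
              have hmono : pvRV d (pvVisit d g' a r₂) ≤ pvRV d r₂ :=
                rv_mono d (fun x hx => visit_sub d g' a r₂ x hx)
              exact ihl _ (by omega) (by omega) (by omega)
        exact main news.reverse (r ++ news) hrf' hrg' hr'

lemma foldVisit_fuel (d : List (String × List String)) :
    ∀ (l : List String) (f g : Nat) (r : List String),
      pvRV d r < f → pvRV d r < g →
      l.foldl (fun r b => pvVisit d f b r) r = l.foldl (fun r b => pvVisit d g b r) r := by
  intro l
  induction l with
  | nil => intro f g r _ _; rfl
  | cons a as ih =>
      intro f g r hf hg
      have hhead := visit_fuel d (pvRV d r) f g a r hf hg le_rfl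
      simp only [List.foldl_cons, hhead]
      have hmono : pvRV d (pvVisit d g a r) ≤ pvRV d r :=
        rv_mono d (fun x hx => visit_sub d g a r x hx)
      exact ih f g _ (by omega) (by omega)

lemma goA_eq (d : List (String × List String)) :
    ∀ (f : Nat) (stack result : List String),
      stack.length + pvRV d result ≤ f →
      pvGoA d f stack result
        = stack.foldl (fun r b => pvVisit d (1 + pvSumLens d) b r) result := by
  intro f
  induction f with
  | zero =>
      intro stack result h
      have : stack = [] := by
        cases stack with
        | nil => rfl
        | cons _ _ => simp at h
      subst this; rfl
  | succ f ih =>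
      intro stack result h
      cases stack with
      | nil => rfl
      | cons x rest =>
          simp only [pvGoA, scanA_eq]
          set ns := PySem.Set.ofList ((PySem.Dict.mk d).getD x []) with hns
          set news := pvNews ns result with hnews
          have hstep := rv_step d ns result (getD_sub d x)
          rw [← hnews] at hstep
          have hmeas : (news.reverse ++ rest).length + pvRV d (result ++ news) ≤ f := by
            simp only [List.length_append, List.length_reverse]
            simp only [List.length_cons] at h
            omega
          rw [ih _ _ hmeas, List.foldl_append, List.foldl_cons]
          congr 1
          have hS : 1 + pvSumLens d = pvSumLens d + 1 := by omega
          rw [hS, visit_succ, ← hns, ← hnews]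
          by_cases hnil : news = []
          · simp [hnil]
          · have hpos : 0 < news.length := List.length_pos_of_ne_nil hnil
            have hrle : pvRV d result ≤ pvSumLens d := rv_le d result
            exact (foldVisit_fuel d news.reverse (pvSumLens d) (pvSumLens d + 1)
              (result ++ news) (by omega) (by omega)).symm

-- ===== VERDICT (by name: the statement is the Claim_ definition above) =====
theorem get_outer_bags_spec : Claim_equal_get_outer_bags := by
  intro bag d _
  unfold Spec_get_outer_bags get_outer_bags get_outer_bags_alt
  have h : ([bag] : List String).length + pvRV d PySem.Set.empty ≤ 1 + pvSumLens d := by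
    have := rv_le d PySem.Set.empty
    simp only [List.length_cons, List.length_nil]
    omega
  rw [goA_eq d (1 + pvSumLens d) [bag] PySem.Set.empty h]
  simp
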